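-- pv_equiv track=rewrite | github.com/iot-lab/ws-cli-tools | iotlabwscli/websocket.py | _group_nodes
-- ===== SOURCE A (Python) =====
-- from collections import OrderedDict, namedtuple
--
-- def _group_nodes(nodes):
--     """Returns a dict with sites as keys and list of nodes as values.
--
--     >>> _group_nodes(['m3-1.saclay.iot-lab.info'])
--     OrderedDict([('saclay', ['m3-1'])])
--     >>> _group_nodes(['nrf52dk-7.saclay'])
--     OrderedDict([('saclay', ['nrf52dk-7'])])
--     >>> _group_nodes(['m3-1.saclay.iot-lab.info', 'nrf52dk-7.saclay'])
--     OrderedDict([('saclay', ['m3-1', 'nrf52dk-7'])])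
--     >>> _group_nodes(['m3-1.saclay', 'm3-1.grenoble'])
--     OrderedDict([('grenoble', ['m3-1']), ('saclay', ['m3-1'])])
--     >>> _group_nodes(['m3-1.saclay', 'm3-1'])
--     OrderedDict([('saclay', ['m3-1'])])
--     >>> _group_nodes(['invalid'])
--     OrderedDict()
--     """
--     nodes_grouped = dict()
--     for node in nodes:
--         node_split = node.split('.')
--         if len(node_split) < 2:
--             continue
--         node_name, site = node_split[:2]
--         if site not in nodes_grouped:
--             nodes_grouped.update({site: [node_name]})
--         else:
--             nodes_grouped[site].append(node_name)
--
--     return OrderedDict(sorted(nodes_grouped.items(), key=lambda t: t[0]))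
-- ===== SOURCE B (Python) =====
-- from collections import OrderedDict
--
--
-- def _group_nodes(nodes):
--     """Group node names by site, sites in sorted order.
--
--     Different decomposition: no hash buckets -- parse once into
--     (site, name) pairs, then for each distinct site (sorted) collect
--     its names by a filtering scan over the pairs.
--     """
--     pairs = []
--     for node in nodes:
--         parts = node.split('.')
--         if len(parts) >= 2:
--             pairs.append((parts[1], parts[0]))
--     sites = sorted(set(site for site, _ in pairs))
--     return OrderedDict(
--         (site, [name for s, name in pairs if s == site]) for site in sites)
-- ===== Notes on version B (the rewrite author's own statement) =====
-- stated objective: alternative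
-- what changed: B drops A's hash-bucket dict entirely: it parses nodes once into (site, name) pairs, sorts the distinct sites, and builds each group by a filtering scan over the pairs, instead of appending into per-site dict buckets and sorting the dict items.
import Mathlib
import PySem

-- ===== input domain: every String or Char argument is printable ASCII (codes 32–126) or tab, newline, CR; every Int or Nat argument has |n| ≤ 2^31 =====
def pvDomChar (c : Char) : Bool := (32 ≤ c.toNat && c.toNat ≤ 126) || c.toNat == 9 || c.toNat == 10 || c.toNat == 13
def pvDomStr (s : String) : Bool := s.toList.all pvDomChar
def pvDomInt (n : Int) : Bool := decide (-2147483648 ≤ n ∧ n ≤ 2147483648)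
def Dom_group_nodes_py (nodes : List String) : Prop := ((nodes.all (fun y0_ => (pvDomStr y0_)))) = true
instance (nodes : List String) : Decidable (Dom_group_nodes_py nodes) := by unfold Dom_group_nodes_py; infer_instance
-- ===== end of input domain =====

-- B replaces A's hash-bucket-then-sort-items strategy by a different decomposition with
-- no dict at all: parse into (site, name) pairs, sort the distinct sites, and collect each
-- site's names by a filtering scan over the pairs (objective: alternative, not faster).

-- ===== PORT A =====
def group_nodes_py (nodes : List String) : List (String × List String) :=
  let nodes_grouped : PySem.Dict String (List String) :=
    nodes.foldl (fun nodes_grouped node =>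
      let node_split := (PySem.Str.split? node ".").getD []   -- sep "." ≠ "", so split? is always some
      if node_split.length < 2 then nodes_grouped
      else
        let node_name := PySem.List.pyGetD node_split 0 ""
        let site := PySem.List.pyGetD node_split 1 ""
        if nodes_grouped.contains site = false then
          nodes_grouped.insert site [node_name]
        else
          nodes_grouped.modify site [] (fun l => l ++ [node_name])
      ) PySem.Dict.empty
  PySem.List.sorted nodes_grouped.items (fun t => t.1)

-- ===== PORT B =====
def group_nodes_py_alt (nodes : List String) : List (String × List String) :=
  let pairs : List (String × String) :=
    nodes.foldl (fun pairs node =>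
      let parts := (PySem.Str.split? node ".").getD []   -- sep "." ≠ "", so split? is always some
      if 2 ≤ parts.length then
        pairs ++ [(PySem.List.pyGetD parts 1 "", PySem.List.pyGetD parts 0 "")]
      else pairs) []
  let sites := PySem.List.sorted (PySem.Set.ofList (pairs.map (fun p => p.1))) (fun s => s)
  sites.map (fun site => (site, (pairs.filter (fun p => p.1 == site)).map (fun p => p.2)))

-- ===== PRECONDITION & SPEC =====
def Spec_group_nodes_py (nodes : List String) (out : List (String × List String)) : Prop := out = group_nodes_py_alt nodes
instance (nodes : List String) (out : List (String × List String)) : Decidable (Spec_group_nodes_py nodes out) := by unfold Spec_group_nodes_py; infer_instance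

-- ===== CLAIM (what is proved, stated in full; the proofs are below) =====
def Claim_equal_group_nodes_py : Prop := ∀ (nodes : List String), Dom_group_nodes_py nodes → Spec_group_nodes_py nodes (group_nodes_py nodes)

-- ===== LEMMAS AND PROOFS =====

-- the common parsing step: some (site, node_name) iff the node has ≥ 2 dot-parts
def pvParse (node : String) : Option (String × String) :=
  let parts := (PySem.Str.split? node ".").getD []
  if 2 ≤ parts.length then
    some (PySem.List.pyGetD parts 1 "", PySem.List.pyGetD parts 0 "")
  else none

-- A's dict loop is the canonical modify-append loop over the parsed pairs
lemma portA_dict_eq (nodes : List String) :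
    nodes.foldl (fun nodes_grouped node =>
      let node_split := (PySem.Str.split? node ".").getD []
      if node_split.length < 2 then nodes_grouped
      else
        let node_name := PySem.List.pyGetD node_split 0 ""
        let site := PySem.List.pyGetD node_split 1 ""
        if nodes_grouped.contains site = false then
          nodes_grouped.insert site [node_name]
        else
          nodes_grouped.modify site [] (fun l => l ++ [node_name])
      ) PySem.Dict.empty
    = (nodes.filterMap pvParse).foldl
        (fun d p => d.modify p.1 [] (fun l => l ++ [p.2])) PySem.Dict.empty := by
  rw [List.foldl_filterMap]
  congr 1
  funext d node
  simp only [pvParse]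
  by_cases h : 2 ≤ ((PySem.Str.split? node ".").getD []).length
  · rw [if_pos h, if_neg (by omega : ¬ ((PySem.Str.split? node ".").getD []).length < 2)]
    by_cases hc : d.contains (PySem.List.pyGetD ((PySem.Str.split? node ".").getD []) 1 "") = false
    · rw [if_pos hc]
      -- insert of a fresh key is the same as modify with default []
      simp [PySem.Dict.modify, PySem.Dict.getD_of_not_contains, hc]
    · rw [if_neg hc]
  · rw [if_neg h, if_pos (by omega : ((PySem.Str.split? node ".").getD []).length < 2)]

-- B's pair-building loop is filterMap pvParse
lemma portB_pairs_eq (nodes : List String) :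
    nodes.foldl (fun pairs node =>
      let parts := (PySem.Str.split? node ".").getD []
      if 2 ≤ parts.length then
        pairs ++ [(PySem.List.pyGetD parts 1 "", PySem.List.pyGetD parts 0 "")]
      else pairs) []
    = nodes.filterMap pvParse := by
  rw [← List.nil_append (nodes.filterMap pvParse), ← PySem.List.foldl_append_singleton,
    List.foldl_filterMap]
  congr 1
  funext acc node
  simp only [pvParse]
  by_cases h : 2 ≤ ((PySem.Str.split? node ".").getD []).length
  · rw [if_pos h, if_pos h]
  · rw [if_neg h, if_neg h]

-- the items of the modify-append dict, as a map over the distinct sites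
lemma dict_items (L : List (String × String)) :
    ((L.foldl (fun d p => d.modify p.1 [] (fun l => l ++ [p.2]))
        (PySem.Dict.empty : PySem.Dict String (List String))).items)
    = (PySem.Set.ofList (L.map (fun p => p.1))).map
        (fun s => (s, (L.filter (fun p => p.1 == s)).map (fun p => p.2))) := by
  have hnd : (L.foldl (fun d p => d.modify p.1 [] (fun l => l ++ [p.2]))
      (PySem.Dict.empty : PySem.Dict String (List String))).keys.Nodup := by
    exact PySem.Dict.nodup_keys_foldl_modify_key L (fun p => p.1) []
      (fun _ p l => l ++ [p.2]) PySem.Dict.empty (by simp [PySem.Dict.keys_empty])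
  have hkeys : (L.foldl (fun d p => d.modify p.1 [] (fun l => l ++ [p.2]))
      (PySem.Dict.empty : PySem.Dict String (List String))).keys
      = PySem.Set.ofList (L.map (fun p => p.1)) := by
    rw [PySem.Dict.keys_foldl_modify_key L (fun p => p.1) [] (fun _ p l => l ++ [p.2])]
    simp [PySem.Dict.keys_empty, PySem.Set.update_nil_left]
  rw [PySem.Dict.items_eq_map_keys _ hnd [], hkeys]
  refine List.map_congr_left (fun s _ => ?_)
  rw [PySem.Dict.getD_foldl_modify_append L PySem.Dict.empty s]
  simp [PySem.Dict.getD_empty]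

-- sorting a strictly-keyed map by fst = mapping over the sorted distinct keys
lemma sorted_map_fst (S : List String) (g : String → List String) (hnd : S.Nodup) :
    PySem.List.sorted (S.map (fun s => (s, g s))) (fun t => t.1)
    = (PySem.List.sorted S (fun s => s)).map (fun s => (s, g s)) := by
  apply PySem.List.sorted_eq_of_perm_of_pairwise_lt
  · exact (PySem.List.sorted_perm S (fun s => s) false).map _
  · rw [List.pairwise_map]
    have hle : (PySem.List.sorted S (fun s => s)).Pairwise (fun a b => a ≤ b) :=
      PySem.List.sorted_pairwise S (fun s => s)
    have hne : (PySem.List.sorted S (fun s => s)).Nodup :=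
      (PySem.List.sorted_perm S (fun s => s) false).nodup_iff.mpr hnd
    exact (hle.and hne).imp (fun h => lt_of_le_of_ne h.1 h.2)

-- ===== VERDICT (by name: the statement is the Claim_ definition above) =====
theorem group_nodes_py_spec : Claim_equal_group_nodes_py := by
  intro nodes _
  unfold Spec_group_nodes_py group_nodes_py group_nodes_py_alt
  simp only []
  rw [portA_dict_eq, portB_pairs_eq, dict_items]
  exact sorted_map_fst _ _ (PySem.Set.nodup_ofList _)
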